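-- pv_equiv track=rewrite | github.com/creepereye1204/Algorithm | 389481-2.py | solution
-- ===== SOURCE A (Python) =====
-- from string import ascii_lowercase
--
-- def convert(num):
--     stack = []
--     while num > 0:
--         num, rem = divmod(num-1, 26)
--         stack.append(ascii_lowercase[rem])
--     return ''.join(stack[::-1])
--
-- def deconvert(text):
--     ch = {c: idx+1 for idx, c in enumerate(ascii_lowercase)}
--     num = 0
--     for t in text:
--         num = num*26+ch[t]
--     return num
--
-- def solution(n, bans):
--
--     bans = sorted(list(map(deconvert, bans)))
--
--     for ban in bans:
--         if ban <= n:
--             n += 1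
--         else:
--             break
--
--     return convert(n)
-- ===== SOURCE B (Python) =====
-- # Fixpoint re-implementation: instead of sorting the bans and skipping past them
-- # one at a time, compute the answer as the least fixpoint v = n + #{bans <= v}
-- # by repeated counting jumps (multiplicities preserved), then convert.
--
-- def convert_b(num):
--     if num <= 0:
--         return ""
--     q, r = divmod(num - 1, 26)
--     return convert_b(q) + chr(97 + r)
--
--
-- def deconvert_b(text):
--     num = 0
--     for c in text:
--         num = num * 26 + (ord(c) - 96)
--     return num
--
--
-- def solution(n, bans):
--     vals = [deconvert_b(s) for s in bans]
--     v = n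
--     for _ in range(len(vals) + 1):
--         nv = n + sum(1 for x in vals if x <= v)
--         if nv == v:
--             break
--         v = nv
--     return convert_b(v)
-- ===== Notes on version B (the rewrite author's own statement) =====
-- stated objective: faster
-- what changed: Replaces the sort-then-linear-skip loop (increment n once per ban <= current n, in sorted order) by an unsorted multiplicity-preserving count and a jump-to-least-fixpoint iteration v = n + #{bans <= v}, and replaces the per-call dict-building deconvert and stack-and-reverse convert by ord arithmetic and structural recursion.
import Mathlib
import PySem

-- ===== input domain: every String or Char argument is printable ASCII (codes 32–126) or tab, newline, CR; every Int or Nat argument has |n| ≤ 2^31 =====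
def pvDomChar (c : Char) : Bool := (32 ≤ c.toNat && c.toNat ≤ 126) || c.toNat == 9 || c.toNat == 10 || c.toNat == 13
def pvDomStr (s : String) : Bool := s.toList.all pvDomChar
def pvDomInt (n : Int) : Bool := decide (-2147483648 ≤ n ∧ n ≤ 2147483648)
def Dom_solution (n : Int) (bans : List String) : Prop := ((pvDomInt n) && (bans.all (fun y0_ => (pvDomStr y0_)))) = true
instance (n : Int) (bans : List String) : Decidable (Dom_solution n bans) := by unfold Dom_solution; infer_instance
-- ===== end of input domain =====

-- B replaces A's sort + one-at-a-time skip loop by an unsorted count and a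
-- jump-to-least-fixpoint iteration v = n + #{bans <= v}; measured faster (no sort, no per-ban dict build).

-- ===== PORT A =====

-- ascii_lowercase ported at the char-list level (strings are handled on List Char, exact)
def asciiLowercase : List Char :=
  ['a','b','c','d','e','f','g','h','i','j','k','l','m','n','o','p','q','r','s','t','u','v','w','x','y','z']

-- while num > 0: num, rem = divmod(num-1, 26); stack.append(ascii_lowercase[rem])
-- (the index rem = (num-1) % 26 is always in range 0..25, so the .getD branch is unreachable)
def convertAGo (num : Int) (stack : List Char) : List Char :=
  if h : 0 < num then
    convertAGo (PySem.Int.floordiv (num - 1) 26)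
      (stack ++ [(PySem.List.pyGet? asciiLowercase (PySem.Int.mod (num - 1) 26)).getD 'a'])
  else stack
termination_by num.toNat
decreasing_by
  have h26 : (0:Int) < 26 := by norm_num
  rw [PySem.Int.floordiv_eq_ediv_of_pos h26]
  have h1 : (0:Int) ≤ num - 1 := by omega
  have h2 : (num - 1) / 26 ≤ num - 1 := Int.ediv_le_self _ h1
  have h3 : (0:Int) ≤ (num - 1) / 26 := Int.ediv_nonneg h1 (by norm_num)
  omega

-- ''.join(stack[::-1])  (ported at the char-list level; xs[::-1] is PySem.List.slice?)
def convertA (num : Int) : String :=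
  String.ofList ((PySem.List.slice? (convertAGo num []) none none (-1)).getD [])

-- ch = {c: idx+1 for idx, c in enumerate(ascii_lowercase)}
def chDictA : PySem.Dict Char Int :=
  (PySem.List.enumerate asciiLowercase 0).foldl
    (fun d p => d.insert p.2 ((p.1 : Int) + 1)) PySem.Dict.empty

-- num = num*26 + ch[t]  (ch[t] raises KeyError outside 'a'..'z'; Pre_solution excludes that,
-- so the .getD default is unreachable on admitted inputs)
def deconvertA (text : String) : Int :=
  text.toList.foldl (fun num t => num * 26 + chDictA.getD t 0) 0

def aLoop : List Int → Int → Int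
  | [], n => n
  | b :: bs, n => if b ≤ n then aLoop bs (n + 1) else n

def solution (n : Int) (bans : List String) : String :=
  convertA (aLoop (PySem.List.sorted (bans.map deconvertA) (fun x => x)) n)

-- ===== PORT B =====

-- convert_b: structural recursion, most-significant letter first
def convertBChars (num : Int) : List Char :=
  if h : num ≤ 0 then []
  else
    convertBChars (PySem.Int.floordiv (num - 1) 26)
      ++ [Char.ofNat (97 + (PySem.Int.mod (num - 1) 26)).toNat]
termination_by num.toNat
decreasing_by
  have h26 : (0:Int) < 26 := by norm_num
  rw [PySem.Int.floordiv_eq_ediv_of_pos h26]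
  have h1 : (0:Int) ≤ num - 1 := by omega
  have h2 : (num - 1) / 26 ≤ num - 1 := Int.ediv_le_self _ h1
  have h3 : (0:Int) ≤ (num - 1) / 26 := Int.ediv_nonneg h1 (by norm_num)
  omega

def convertB (num : Int) : String := String.ofList (convertBChars num)

-- num = num*26 + (ord(c) - 96)
def deconvertB (text : String) : Int :=
  text.toList.foldl (fun num c => num * 26 + ((c.toNat : Int) - 96)) 0

-- for _ in range(len(vals)+1): nv = n + sum(1 for x in vals if x <= v); break / v = nv
-- (sum of the 0/1 generator is List.countP)
def bLoop (n : Int) (vals : List Int) : Nat → Int → Int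
  | 0, v => v
  | f + 1, v =>
    let nv := n + (vals.countP (fun x => decide (x ≤ v)) : Int)
    if nv = v then v else bLoop n vals f nv

def solution_alt (n : Int) (bans : List String) : String :=
  let vals := bans.map deconvertB
  convertB (bLoop n vals (vals.length + 1) n)

-- ===== PRECONDITION & SPEC =====

-- Pre_ excludes exactly the inputs where A raises KeyError: some ban contains a
-- character outside 'a'..'z' (the dict ch has only lowercase keys).
def Pre_solution (n : Int) (bans : List String) : Prop :=
  (bans.all (fun s => s.toList.all (fun c => asciiLowercase.contains c))) = true
instance (n : Int) (bans : List String) : Decidable (Pre_solution n bans) := by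
  unfold Pre_solution; infer_instance

def pvWitness_solution : Int × List String := (3, ["a", "b", "b"])

def Spec_solution (n : Int) (bans : List String) (out : String) : Prop := out = solution_alt n bans
instance (n : Int) (bans : List String) (out : String) : Decidable (Spec_solution n bans out) := by unfold Spec_solution; infer_instance

-- ===== CLAIM (what is proved, stated in full; the proofs are below) =====
def Claim_equal_solution : Prop := ∀ (n : Int) (bans : List String), Dom_solution n bans → Pre_solution n bans → Spec_solution n bans (solution n bans)

-- ===== LEMMAS AND PROOFS =====

-- chr(97+r) = ascii_lowercase[r] for 0 <= r < 26
lemma pyGet_ascii (r : Int) (h0 : 0 ≤ r) (h1 : r < 26) :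
    (PySem.List.pyGet? asciiLowercase r).getD 'a' = Char.ofNat (97 + r).toNat := by
  interval_cases r <;> decide

lemma mod26_bounds (a : Int) : 0 ≤ PySem.Int.mod a 26 ∧ PySem.Int.mod a 26 < 26 := by
  rw [PySem.Int.mod_eq_emod_of_pos (by norm_num)]
  constructor
  · exact Int.emod_nonneg a (by norm_num)
  · exact Int.emod_lt_of_pos a (by norm_num)

-- A's while-loop stack is B's recursion, reversed, appended to the running stack
lemma convertAGo_eq (num : Int) (stack : List Char) :
    convertAGo num stack = stack ++ (convertBChars num).reverse := by
  by_cases h : 0 < num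
  · rw [convertAGo, dif_pos h, convertBChars, dif_neg (by omega)]
    rw [convertAGo_eq (PySem.Int.floordiv (num - 1) 26)]
    obtain ⟨hm0, hm1⟩ := mod26_bounds (num - 1)
    rw [pyGet_ascii _ hm0 hm1]
    simp
  · rw [convertAGo, dif_neg h, convertBChars, dif_pos (by omega)]
    simp
termination_by num.toNat
decreasing_by
  have h26 : (0:Int) < 26 := by norm_num
  rw [PySem.Int.floordiv_eq_ediv_of_pos h26]
  have h1 : (0:Int) ≤ num - 1 := by omega
  have h2 : (num - 1) / 26 ≤ num - 1 := Int.ediv_le_self _ h1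
  have h3 : (0:Int) ≤ (num - 1) / 26 := Int.ediv_nonneg h1 (by norm_num)
  omega

lemma convertA_eq_convertB (num : Int) : convertA num = convertB num := by
  rw [convertA, convertB, PySem.List.slice?_none_none_neg_one]
  rw [convertAGo_eq]
  simp

-- dict lookup = ord arithmetic on lowercase letters
lemma chDictA_getD (c : Char) (hc : c ∈ asciiLowercase) :
    chDictA.getD c 0 = (c.toNat : Int) - 96 := by
  fin_cases hc <;> decide

lemma deconvert_fold_eq (cs : List Char) (hs : ∀ c ∈ cs, c ∈ asciiLowercase) (a : Int) :
    cs.foldl (fun num t => num * 26 + chDictA.getD t 0) a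
      = cs.foldl (fun num c => num * 26 + ((c.toNat : Int) - 96)) a := by
  induction cs generalizing a with
  | nil => rfl
  | cons c cs ih =>
    simp only [List.foldl_cons]
    rw [chDictA_getD c (hs c (by simp))]
    exact ih (fun c hc => hs c (by simp [hc])) _

lemma deconvertA_eq (s : String) (hs : ∀ c ∈ s.toList, c ∈ asciiLowercase) :
    deconvertA s = deconvertB s := by
  rw [deconvertA, deconvertB, deconvert_fold_eq s.toList hs]

lemma aLoop_ge (bs : List Int) (n : Int) : n ≤ aLoop bs n := by
  induction bs generalizing n with
  | nil => simp [aLoop]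
  | cons b bs ih =>
    rw [aLoop]
    split_ifs with h
    · have := ih (n + 1); omega
    · omega

-- A's result is a fixpoint of v ↦ n + #{bans ≤ v} (needs the list sorted)
lemma aLoop_fix (bs : List Int) (n : Int) (hs : bs.Pairwise (· ≤ ·)) :
    aLoop bs n = n + (bs.countP (fun x => decide (x ≤ aLoop bs n)) : Int) := by
  induction bs generalizing n with
  | nil => simp [aLoop]
  | cons b bs ih =>
    rw [List.pairwise_cons] at hs
    rw [aLoop]
    split_ifs with h
    · have hge := aLoop_ge bs (n + 1)
      rw [List.countP_cons]
      have hble : decide (b ≤ aLoop bs (n+1)) = true := by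
        simp only [decide_eq_true_eq]; omega
      rw [hble]
      have := ih (n + 1) hs.2
      simp only [if_true]
      push_cast
      omega
    · have hnone : bs.countP (fun x => decide (x ≤ n)) = 0 := by
        rw [List.countP_eq_zero]
        intro x hx
        have := hs.1 x hx
        simp; omega
      rw [List.countP_cons, hnone]
      simp; omega

-- A's result is the least pre-fixpoint ≥ n (no sortedness needed)
lemma aLoop_min (bs : List Int) (n v : Int) (h1 : n ≤ v)
    (h2 : n + (bs.countP (fun x => decide (x ≤ v)) : Int) ≤ v) : aLoop bs n ≤ v := by
  induction bs generalizing n with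
  | nil => simpa [aLoop]
  | cons b bs ih =>
    rw [List.countP_cons] at h2
    rw [aLoop]
    split_ifs with h
    · have hble : decide (b ≤ v) = true := by simp only [decide_eq_true_eq]; omega
      simp only [hble, if_true] at h2
      push_cast at h2
      apply ih (n + 1) (by omega) (by omega)
    · exact h1

lemma countP_le_mono (xs : List Int) (v w : Int) (h : v ≤ w) :
    xs.countP (fun x => decide (x ≤ v)) ≤ xs.countP (fun x => decide (x ≤ w)) := by
  apply List.countP_mono_left
  intro x _ hx
  have hx' : x ≤ v := of_decide_eq_true hx
  exact decide_eq_true (by omega)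

-- the fixpoint iteration reaches A's result r whenever v ≤ r and v - n ≤ #{≤ v}
lemma bLoop_eq (n : Int) (vals S : List Int) (hperm : S.Perm (vals))
    (hS : S.Pairwise (· ≤ ·)) (f : Nat) (v : Int)
    (hv1 : v ≤ aLoop S n) (hv2 : v - n ≤ (vals.countP (fun x => decide (x ≤ v)) : Int))
    (hf : (aLoop S n - v).toNat < f) :
    bLoop n vals f v = aLoop S n := by
  set r := aLoop S n with hr
  induction f generalizing v with
  | zero => omega
  | succ f ih =>
    rw [bLoop]
    split_ifs with h
    · -- v is a fixpoint; minimality forces v = r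
      have hcnt : S.countP (fun x => decide (x ≤ v)) = vals.countP (fun x => decide (x ≤ v)) :=
        hperm.countP_eq _
      have hmin : aLoop S n ≤ v := aLoop_min S n v (by
          have := aLoop_ge S n; omega) (by rw [hcnt]; omega)
      omega
    · set nv := n + (vals.countP (fun x => decide (x ≤ v)) : Int) with hnv
      have hgt : v < nv := by omega
      have hcntr : S.countP (fun x => decide (x ≤ r)) = vals.countP (fun x => decide (x ≤ r)) :=
        hperm.countP_eq _
      have hfix := aLoop_fix S n hS
      have hmono := countP_le_mono vals v r hv1
      have hnvr : nv ≤ r := by rw [hnv]; rw [← hr] at hfix; rw [hcntr] at hfix; omega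
      have hmono2 := countP_le_mono vals v nv (le_of_lt hgt)
      refine ih nv ?_ ?_ ?_ <;> omega

lemma bLoop_start (n : Int) (vals S : List Int) (hperm : S.Perm vals)
    (hS : S.Pairwise (· ≤ ·)) :
    bLoop n vals (vals.length + 1) n = aLoop S n := by
  apply bLoop_eq n vals S hperm hS
  · exact aLoop_ge S n
  · have : (0:Int) ≤ (vals.countP (fun x => decide (x ≤ n)) : Int) := by positivity
    omega
  · have hfix := aLoop_fix S n hS
    have hle : S.countP (fun x => decide (x ≤ aLoop S n)) ≤ S.length := List.countP_le_length
    have hlen : S.length = vals.length := hperm.length_eq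
    omega

-- ===== VERDICT (by name: the statement is the Claim_ definition above) =====
theorem solution_spec : Claim_equal_solution := by
  intro n bans _hdom hpre
  have hpre' : ∀ s ∈ bans, ∀ c ∈ s.toList, c ∈ asciiLowercase := by
    unfold Pre_solution at hpre
    simpa [List.all_eq_true] using hpre
  unfold Spec_solution solution solution_alt
  have hmap : bans.map deconvertA = bans.map deconvertB := by
    apply List.map_congr_left
    intro s hs
    exact deconvertA_eq s (hpre' s hs)
  rw [hmap]
  set vals := bans.map deconvertB with hvals
  set S := PySem.List.sorted vals (fun x => x) with hS
  have hperm : S.Perm vals := PySem.List.sorted_perm vals (fun x => x) false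
  have hpw : S.Pairwise (· ≤ ·) := by
    have := PySem.List.sorted_pairwise vals (fun x => x)
    simpa using this
  rw [convertA_eq_convertB]
  show convertB (aLoop S n) = convertB (bLoop n vals (vals.length + 1) n)
  rw [bLoop_start n vals S hperm hpw]
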